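-- pv_equiv track=rewrite | github.com/scarlet2131/DSA | TCS-Codevita/MirrorMaze.py | dfs
-- ===== SOURCE A (Python) =====
-- def get_next_direction(x, y, direction, grid):
--     """Returns the next direction after hitting a mirror"""
--     if grid[x][y] == '/':
--         if direction == 'up':
--             return 'right'
--         elif direction == 'right':
--             return 'up'
--         elif direction == 'down':
--             return 'left'
--         elif direction == 'left':
--             return 'down'
--     elif grid[x][y] == '\\':
--         if direction == 'up':
--             return 'left'
--         elif direction == 'right':
--             return 'down'
--         elif direction == 'down':
--             return 'right'
--         elif direction == 'left':
--             return 'up'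
--     return direction  # Continue in the same direction if no mirror
--
-- def dfs(x, y, direction, visited, grid):
--     """Simulate the light's path and return the length of the loop if found"""
--     path = []
--     visited_positions = set()  # Track the positions to detect cycles
--
--     while True:
--         # If out of bounds, no loop can be formed
--         if not (0 <= x < len(grid) and 0 <= y < len(grid[0])):
--             return 0
--
--         # If the current position with direction has been visited, return loop length
--         if (x, y, direction) in visited_positions:
--             # Find the cycle length
--             loop_start = (x, y, direction)
--             loop_cells = path[path.index(loop_start):]
--             return len(loop_cells)
--
--         # Mark the current state as visited and add it to the path
--         visited_positions.add((x, y, direction))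
--         path.append((x, y, direction))
--
--         # Move to the next position based on the current direction
--         direction = get_next_direction(x, y, direction, grid)
--
--         # Directions: (dx, dy) for up, right, down, left
--         directions = {
--             'up': (-1, 0),
--             'right': (0, 1),
--             'down': (1, 0),
--             'left': (0, -1)
--         }
--
--         dx, dy = directions[direction]
--         x, y = x + dx, y + dy
--
--     return 0  # No loop found
-- ===== SOURCE B (Python) =====
-- def get_next_direction(x, y, direction, grid):
--     """Returns the next direction after hitting a mirror"""
--     if grid[x][y] == '/':
--         if direction == 'up':
--             return 'right'
--         elif direction == 'right':
--             return 'up'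
--         elif direction == 'down':
--             return 'left'
--         elif direction == 'left':
--             return 'down'
--     elif grid[x][y] == '\\':
--         if direction == 'up':
--             return 'left'
--         elif direction == 'right':
--             return 'down'
--         elif direction == 'down':
--             return 'right'
--         elif direction == 'left':
--             return 'up'
--     return direction  # Continue in the same direction if no mirror
--
--
-- def dfs(x, y, direction, visited, grid):
--     """Constant-space cycle detection: no visited set, no path list.
--
--     step() advances the beam one cell (None = it left the grid).  There are at
--     most 4*R*C distinct in-grid states, so after 4*R*C+1 steps the beam has
--     either escaped (no loop: return 0) or is guaranteed to sit ON the loop;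
--     walking once around from there counts the loop's exact period."""
--     deltas = {'up': (-1, 0), 'right': (0, 1), 'down': (1, 0), 'left': (0, -1)}
--
--     def step(state):
--         sx, sy, d = state
--         if not (0 <= sx < len(grid) and 0 <= sy < len(grid[0])):
--             return None
--         d = get_next_direction(sx, sy, d, grid)
--         dx, dy = deltas[d]
--         return (sx + dx, sy + dy, d)
--
--     n = 4 * len(grid) * (len(grid[0]) if grid else 0)
--     cur = (x, y, direction)
--     for _ in range(n + 1):
--         cur = step(cur)
--         if cur is None:
--             return 0
--     # cur is now on the loop; walk around it once to measure the period.
--     length = 1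
--     probe = step(cur)
--     while probe != cur:
--         probe = step(probe)
--         length += 1
--     return length
-- ===== Notes on version B (the rewrite author's own statement) =====
-- stated objective: alternative
-- what changed: B replaces A's visited-set + path-list + final path.index scan by constant-space cycle detection over a step(state) function: advance 4*R*C+1 steps (escape -> 0), which provably lands the cursor on the loop, then walk once around the loop to count its exact period.
-- outside the precondition, e.g. on dfs(0, 0, 'down', set(), ['ab', 'a']): A returns 0, B returns 0
import Mathlib
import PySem

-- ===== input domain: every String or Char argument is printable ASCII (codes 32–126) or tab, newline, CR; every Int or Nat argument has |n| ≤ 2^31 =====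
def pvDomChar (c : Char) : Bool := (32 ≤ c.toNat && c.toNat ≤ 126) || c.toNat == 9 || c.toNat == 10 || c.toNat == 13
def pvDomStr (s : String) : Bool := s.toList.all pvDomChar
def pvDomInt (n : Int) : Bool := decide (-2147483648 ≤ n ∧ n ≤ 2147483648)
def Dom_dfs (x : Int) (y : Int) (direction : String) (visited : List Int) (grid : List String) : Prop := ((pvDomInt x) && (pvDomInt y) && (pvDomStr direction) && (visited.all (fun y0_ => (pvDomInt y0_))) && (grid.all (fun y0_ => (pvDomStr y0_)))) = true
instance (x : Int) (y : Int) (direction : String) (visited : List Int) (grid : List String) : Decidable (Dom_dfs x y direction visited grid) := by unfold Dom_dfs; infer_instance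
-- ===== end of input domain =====

-- B replaces A's visited set + path list + final path.index scan by constant-space cycle
-- detection: a step function is iterated 4*R*C+1 times (escape -> 0), which lands the cursor
-- on the loop, and one further walk around the loop counts its exact period; objective:
-- alternative (O(1) memory). Equal return values proved on Pre_dfs.

-- ===== PORT A =====
-- shared helper (identical function in Source A and Source B): get_next_direction.
-- grid[x][y]: the 'none' fallthrough (Python IndexError) returns direction; it is only reached out of bounds, excluded by Pre_dfs.
def getNextDirection (x : Int) (y : Int) (direction : String) (grid : List String) : String :=
  match (PySem.List.pyGet? grid x).bind (fun row => PySem.Str.pyGet? row y) with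
  | some '/' =>
      if direction = "up" then "right"
      else if direction = "right" then "up"
      else if direction = "down" then "left"
      else if direction = "left" then "down"
      else direction
  | some '\\' =>
      if direction = "up" then "left"
      else if direction = "right" then "down"
      else if direction = "down" then "right"
      else if direction = "left" then "up"
      else direction
  | _ => direction

-- shared helper: the literal deltas dict both Pythons build, subscripted (none = Python KeyError, excluded by Pre_dfs)
def dirDelta (d : String) : Option (Int × Int) :=
  PySem.Dict.get? (PySem.Dict.ofList [("up", ((-1 : Int), (0 : Int))), ("right", (0, 1)), ("down", (1, 0)), ("left", (0, -1))]) d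

-- shared helper: the bounds test '0 <= x < len(grid) and 0 <= y < len(grid[0])' (grid[0] is only read when 0 ≤ x < len(grid), hence grid ≠ [])
def pvInBounds (x : Int) (y : Int) (grid : List String) : Bool :=
  decide (0 ≤ x ∧ x < (grid.length : Int) ∧ 0 ≤ y ∧ y < PySem.Str.len (grid.headD ""))

-- A's 'while True' loop; fuel is a totality guard only: each iteration adds a fresh state to the set of
-- at most 4*len(grid)*len(grid[0]) in-bounds states, so the initial fuel is never exhausted on Pre_dfs inputs.
def dfsLoop (grid : List String) : Nat → Int → Int → String → List (Int × Int × String) → PySem.Set (Int × Int × String) → Int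
  | 0, _, _, _, _, _ => 0
  | fuel + 1, x, y, direction, path, visitedPositions =>
    if pvInBounds x y grid then
      if PySem.Set.contains visitedPositions (x, y, direction) then
        match PySem.List.index? path (x, y, direction) with
        | some i => ((PySem.List.slice path (some (i : Int)) none).length : Int)
        | none => 0   -- Python ValueError from path.index; unreachable: path holds exactly the states in visitedPositions
      else
        let visitedPositions' := PySem.Set.add visitedPositions (x, y, direction)
        let path' := path ++ [(x, y, direction)]
        let direction' := getNextDirection x y direction grid
        match dirDelta direction' with
        | some (dx, dy) => dfsLoop grid fuel (x + dx) (y + dy) direction' path' visitedPositions'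
        | none => 0   -- Python KeyError; excluded by Pre_dfs
    else 0

def dfs (x : Int) (y : Int) (direction : String) (visited : List Int) (grid : List String) : Int :=
  dfsLoop grid (4 * grid.length * (PySem.Str.len (grid.headD "")).toNat + 2) x y direction [] PySem.Set.empty

-- ===== PORT B =====
-- B's step(state): one move of the beam, none = out of the grid (or, only outside Pre_dfs, the KeyError of deltas[d])
def stepState (grid : List String) (s : Int × Int × String) : Option (Int × Int × String) :=
  if pvInBounds s.1 s.2.1 grid then
    let d' := getNextDirection s.1 s.2.1 s.2.2 grid
    match dirDelta d' with
    | some (dx, dy) => some (s.1 + dx, s.2.1 + dy, d')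
    | none => none
  else none

-- B's 'for _ in range(n+1): cur = step(cur); if cur is None: return 0' phase
def phase1B (grid : List String) : Nat → (Int × Int × String) → Option (Int × Int × String)
  | 0, s => some s
  | k + 1, s =>
    match stepState grid s with
    | none => none
    | some t => phase1B grid k t

-- B's 'while probe != cur' walk once around the loop; fuel is a totality guard only (the loop's
-- period is at most the phase-1 step count, so the initial fuel is never exhausted on Pre_dfs inputs)
def measureLoop (grid : List String) (target : Int × Int × String) : Nat → (Int × Int × String) → Int → Int
  | 0, _, length => length
  | fuel + 1, probe, length =>
    if probe = target then length
    else
      match stepState grid probe with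
      | some p' => measureLoop grid target fuel p' (length + 1)
      | none => length   -- Python's step(None) TypeError; unreachable: phase 1 succeeded, so the orbit never escapes

def dfs_alt (x : Int) (y : Int) (direction : String) (visited : List Int) (grid : List String) : Int :=
  let n := 4 * grid.length * (PySem.Str.len (grid.headD "")).toNat
  match phase1B grid (n + 1) (x, y, direction) with
  | none => 0
  | some cur =>
    match stepState grid cur with
    | some probe => measureLoop grid cur (n + 1) probe 1
    | none => 0   -- Python's step(None) TypeError; unreachable under Pre_dfs (see measureLoop)

-- ===== PRECONDITION & SPEC =====
-- Pre_dfs excludes in-bounds starts whose direction is not one of up/right/down/left (A's deltas lookup raises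
-- KeyError) and in-bounds starts on grids with a row shorter than row 0 (the beam may index past a short row,
-- IndexError); on some such ragged grids A happens to return 0 before reaching the short row — see cites.
def Pre_dfs (x : Int) (y : Int) (direction : String) (visited : List Int) (grid : List String) : Prop :=
  ¬ (0 ≤ x ∧ x < (grid.length : Int) ∧ 0 ≤ y ∧ y < PySem.Str.len (grid.headD "")) ∨
    ((direction = "up" ∨ direction = "right" ∨ direction = "down" ∨ direction = "left") ∧
      ∀ row ∈ grid, PySem.Str.len (grid.headD "") ≤ PySem.Str.len row)

instance (x : Int) (y : Int) (direction : String) (visited : List Int) (grid : List String) : Decidable (Pre_dfs x y direction visited grid) := by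
  unfold Pre_dfs; infer_instance

def pvWitness_dfs : Int × Int × String × List Int × List String := (0, 0, "right", [], ["/\\", "\\/"])

def Spec_dfs (x : Int) (y : Int) (direction : String) (visited : List Int) (grid : List String) (out : Int) : Prop := out = dfs_alt x y direction visited grid
instance (x : Int) (y : Int) (direction : String) (visited : List Int) (grid : List String) (out : Int) : Decidable (Spec_dfs x y direction visited grid out) := by unfold Spec_dfs; infer_instance

-- ===== CLAIM (what is proved, stated in full; the proofs are below) =====
def Claim_equal_dfs : Prop := ∀ (x : Int) (y : Int) (direction : String) (visited : List Int) (grid : List String), Dom_dfs x y direction visited grid → Pre_dfs x y direction visited grid → Spec_dfs x y direction visited grid (dfs x y direction visited grid)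

-- ===== LEMMAS AND PROOFS =====

-- the orbit of the step function from a start state (none once the beam has left the grid)
def orbT (grid : List String) (s0 : Int × Int × String) : Nat → Option (Int × Int × String)
  | 0 => some s0
  | k + 1 => (orbT grid s0 k).bind (stepState grid)

-- the states along the orbit (junk after escape; only used where the orbit is some)
def stO (grid : List String) (s0 : Int × Int × String) (k : Nat) : Int × Int × String :=
  (orbT grid s0 k).getD (0, 0, "")

lemma orbT_eq_some (grid : List String) (s0 : Int × Int × String) (k : Nat)
    (h : orbT grid s0 k ≠ none) : orbT grid s0 k = some (stO grid s0 k) := by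
  unfold stO; cases hh : orbT grid s0 k with
  | none => exact absurd hh h
  | some v => rfl

lemma orbT_mono_none (grid : List String) (s0 : Int × Int × String) {k m : Nat}
    (hkm : k ≤ m) (h : orbT grid s0 k = none) : orbT grid s0 m = none := by
  induction m with
  | zero => have : k = 0 := by omega
            subst this; exact h
  | succ m ih =>
    rcases Nat.lt_or_ge k (m + 1) with hk | hk
    · have hm : orbT grid s0 m = none := ih (by omega)
      show (orbT grid s0 m).bind _ = none
      rw [hm]; rfl
    · have : k = m + 1 := by omega
      subst this; exact h

lemma orbT_step (grid : List String) (s0 : Int × Int × String) (k : Nat)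
    (h : orbT grid s0 (k + 1) ≠ none) :
    stepState grid (stO grid s0 k) = some (stO grid s0 (k + 1)) := by
  have hk : orbT grid s0 k ≠ none := fun hn => h (orbT_mono_none grid s0 (by omega) hn)
  have h1 := orbT_eq_some grid s0 (k + 1) h
  have h0 := orbT_eq_some grid s0 k hk
  have : orbT grid s0 (k + 1) = (orbT grid s0 k).bind (stepState grid) := rfl
  rw [this, h0] at h1
  simpa using h1

-- elimination for a successful step
lemma stepState_some_elim (grid : List String) (s s' : Int × Int × String)
    (h : stepState grid s = some s') :
    pvInBounds s.1 s.2.1 grid = true ∧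
      ∃ dx dy, dirDelta (getNextDirection s.1 s.2.1 s.2.2 grid) = some (dx, dy) ∧
        s' = (s.1 + dx, s.2.1 + dy, getNextDirection s.1 s.2.1 s.2.2 grid) := by
  unfold stepState at h
  split_ifs at h with hb
  · dsimp only at h
    refine ⟨hb, ?_⟩
    cases hd : dirDelta (getNextDirection s.1 s.2.1 s.2.2 grid) with
    | none => simp [hd] at h
    | some p =>
      obtain ⟨dx, dy⟩ := p
      rw [hd] at h
      simp only [Option.some.injEq] at h
      exact ⟨dx, dy, rfl, h.symm⟩

lemma stepState_none_elim (grid : List String) (s : Int × Int × String)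
    (h : stepState grid s = none) :
    ¬ pvInBounds s.1 s.2.1 grid = true ∨
      (pvInBounds s.1 s.2.1 grid = true ∧ dirDelta (getNextDirection s.1 s.2.1 s.2.2 grid) = none) := by
  unfold stepState at h
  split_ifs at h with hb
  · dsimp only at h
    right
    refine ⟨hb, ?_⟩
    cases hd : dirDelta (getNextDirection s.1 s.2.1 s.2.2 grid) with
    | none => rfl
    | some p => obtain ⟨dx, dy⟩ := p; rw [hd] at h; simp at h
  · exact Or.inl hb

lemma dirDelta_some_valid (d : String) (p : Int × Int) (h : dirDelta d = some p) :
    d = "up" ∨ d = "right" ∨ d = "down" ∨ d = "left" := by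
  by_cases h1 : d = "up"
  · exact Or.inl h1
  by_cases h2 : d = "right"
  · exact Or.inr (Or.inl h2)
  by_cases h3 : d = "down"
  · exact Or.inr (Or.inr (Or.inl h3))
  by_cases h4 : d = "left"
  · exact Or.inr (Or.inr (Or.inr h4))
  exfalso
  have e : dirDelta d = PySem.Dict.get? (PySem.Dict.mk [("up", ((-1 : Int), (0 : Int))), ("right", (0, 1)), ("down", (1, 0)), ("left", (0, -1))]) d := by rfl
  rw [e] at h
  have e2 : PySem.Dict.get? (PySem.Dict.mk ([] : List (String × (Int × Int)))) d = none := by rfl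
  simp only [PySem.Dict.get?_mk_cons, beq_iff_eq] at h
  rw [if_neg (fun hh => h1 hh.symm), if_neg (fun hh => h2 hh.symm), if_neg (fun hh => h3 hh.symm), if_neg (fun hh => h4 hh.symm), e2] at h
  simp at h

-- period shift: once the orbit repeats (index a = index b), it is (b-a)-periodic from a on
lemma orbT_shift (grid : List String) (s0 : Int × Int × String) {a b : Nat}
    (hab : a < b) (hrep : orbT grid s0 a = orbT grid s0 b) :
    ∀ k, a ≤ k → orbT grid s0 (k + (b - a)) = orbT grid s0 k := by
  intro k hk
  induction k, hk using Nat.le_induction with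
  | base =>
    have hb : a + (b - a) = b := by omega
    rw [hb, ← hrep]
  | succ k hk ih =>
    have h1 : k + 1 + (b - a) = (k + (b - a)) + 1 := by omega
    rw [h1]
    show (orbT grid s0 (k + (b - a))).bind _ = (orbT grid s0 k).bind _
    rw [ih]

lemma orbT_mod (grid : List String) (s0 : Int × Int × String) {a b : Nat}
    (hab : a < b) (hrep : orbT grid s0 a = orbT grid s0 b) :
    ∀ k, a ≤ k → orbT grid s0 k = orbT grid s0 (a + (k - a) % (b - a)) := by
  intro k
  induction k using Nat.strong_induction_on with
  | _ k ih =>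
    intro hk
    by_cases hsmall : k < a + (b - a)
    · have h1 : (k - a) % (b - a) = k - a := Nat.mod_eq_of_lt (by omega)
      rw [h1]
      congr 1
      omega
    · have hky : k - (b - a) ≥ a := by omega
      have h2 : k = (k - (b - a)) + (b - a) := by omega
      have h3 := orbT_shift grid s0 hab hrep (k - (b - a)) hky
      have h4 : (k - a) % (b - a) = ((k - (b - a)) - a) % (b - a) := by
        have h5 : k - a = ((k - (b - a)) - a) + (b - a) := by omega
        rw [h5, Nat.add_mod_right]
      rw [h4]
      conv_lhs => rw [h2, h3]
      exact ih (k - (b - a)) (by omega) hky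

-- once the orbit repeats it never escapes
lemma orbT_total_of_repeat (grid : List String) (s0 : Int × Int × String) {a b : Nat}
    (hab : a < b) (hrep : orbT grid s0 a = orbT grid s0 b) (hb : orbT grid s0 b ≠ none) :
    ∀ k, orbT grid s0 k ≠ none := by
  intro k hn
  rcases Nat.lt_or_ge k b with hk | hk
  · exact hb (orbT_mono_none grid s0 (by omega) hn)
  · have h1 := orbT_mod grid s0 hab hrep k (by omega)
    rw [h1] at hn
    have h2 : a + (k - a) % (b - a) ≤ b := by
      have := Nat.mod_lt (k - a) (y := b - a) (by omega)
      omega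
    exact hb (orbT_mono_none grid s0 h2 hn)

-- all in-bounds states with a legal direction
def allStates (grid : List String) : List (Int × Int × String) :=
  (List.range grid.length).flatMap fun (i : Nat) =>
    (List.range (PySem.Str.len (grid.headD "")).toNat).flatMap fun (j : Nat) =>
      ["up", "right", "down", "left"].map fun d => ((i : Int), (j : Int), d)

lemma allStates_length (grid : List String) :
    (allStates grid).length = 4 * grid.length * (PySem.Str.len (grid.headD "")).toNat := by
  simp [allStates, List.length_flatMap, Function.comp_def, List.map_const']
  ring

lemma mem_allStates (grid : List String) (s : Int × Int × String)
    (hb : pvInBounds s.1 s.2.1 grid = true)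
    (hd : s.2.2 = "up" ∨ s.2.2 = "right" ∨ s.2.2 = "down" ∨ s.2.2 = "left") :
    s ∈ allStates grid := by
  obtain ⟨x, y, d⟩ := s
  obtain ⟨h1, h2, h3, h4⟩ := of_decide_eq_true hb
  dsimp only at h1 h2 h3 h4 hd
  unfold allStates
  have hx : x.toNat ∈ List.range grid.length := List.mem_range.mpr (by omega)
  have hy : y.toNat ∈ List.range (PySem.Str.len (grid.headD "")).toNat := by
    refine List.mem_range.mpr ?_
    simp only [PySem.Str.len_eq] at h4 ⊢
    omega
  have hdm : d ∈ ["up", "right", "down", "left"] := by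
    rcases hd with h | h | h | h <;> simp [h]
  have heq : (((x.toNat : Nat) : Int), ((y.toNat : Nat) : Int), d) = (x, y, d) := by
    rw [Int.toNat_of_nonneg h1, Int.toNat_of_nonneg h3]
  exact List.mem_flatMap.mpr ⟨x.toNat, hx, List.mem_flatMap.mpr ⟨y.toNat, hy, List.mem_map.mpr ⟨d, hdm, heq⟩⟩⟩

-- pigeonhole: m distinct states, each in allStates, so m ≤ 4*R*C
lemma pigeonhole (grid : List String) (m : Nat) (f : Nat → Int × Int × String)
    (hdist : ∀ a b, a < b → b < m → f a ≠ f b)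
    (hmem : ∀ k, k < m → f k ∈ allStates grid) :
    m ≤ 4 * grid.length * (PySem.Str.len (grid.headD "")).toNat := by
  have hnd : ((List.range m).map f).Nodup := by
    refine List.Nodup.map_on ?_ (List.nodup_range)
    intro a ha b hb hfab
    simp only [List.mem_range] at ha hb
    by_contra hne
    rcases Nat.lt_or_ge a b with h | h
    · exact hdist a b h hb hfab
    · exact hdist b a (by omega) ha hfab.symm
  have hsub : ((List.range m).map f) ⊆ allStates grid := by
    intro v hv
    simp only [List.mem_map, List.mem_range] at hv
    obtain ⟨k, hk, rfl⟩ := hv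
    exact hmem k hk
  have := (List.subperm_of_subset hnd hsub).length_le
  simpa [allStates_length] using this

-- B's phase 1 is the orbit
lemma phase1B_eq (grid : List String) : ∀ (k : Nat) (s : Int × Int × String),
    phase1B grid k s = orbT grid s k := by
  intro k
  induction k with
  | zero => intro s; rfl
  | succ k ih =>
    intro s
    have hfront : orbT grid s (k + 1) = (stepState grid s).bind (fun t => orbT grid t k) := by
      clear ih
      induction k with
      | zero =>
        show (some s).bind _ = _
        cases hst : stepState grid s <;> simp [hst, orbT]
      | succ k ih =>
        show (orbT grid s (k+1)).bind _ = _
        rw [ih]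
        cases stepState grid s with
        | none => rfl
        | some t => rfl
    rw [hfront]
    show (match stepState grid s with | none => none | some t => phase1B grid k t) = _
    cases stepState grid s with
    | none => rfl
    | some t => simp [ih t]

-- B's measuring walk returns the exact period
lemma measure_run (grid : List String) (s0 : Int × Int × String) (N p : Nat)
    (htot : ∀ k, orbT grid s0 k ≠ none)
    (hper : stO grid s0 (N + p) = stO grid s0 N)
    (hmin : ∀ t, 0 < t → t < p → stO grid s0 (N + t) ≠ stO grid s0 N) :
    ∀ len fuel, 1 ≤ len → len ≤ p → p - len < fuel →
      measureLoop grid (stO grid s0 N) fuel (stO grid s0 (N + len)) (len : Int) = (p : Int) := by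
  intro len fuel
  induction fuel generalizing len with
  | zero => intro _ _ h; omega
  | succ fuel ih =>
    intro h1 h2 h3
    by_cases hpt : stO grid s0 (N + len) = stO grid s0 N
    · have hlp : len = p := by
        by_contra hne
        exact hmin len (by omega) (by omega) hpt
      subst hlp
      simp only [measureLoop, if_pos hpt]
    · have hlt : len < p := by
        rcases Nat.lt_or_ge len p with h | h
        · exact h
        · exfalso; apply hpt
          have : len = p := by omega
          rw [this]; exact hper
      have hstep : stepState grid (stO grid s0 (N + len)) = some (stO grid s0 (N + len + 1)) :=
        orbT_step grid s0 (N + len) (htot (N + len + 1))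
      simp only [measureLoop, if_neg hpt, hstep]
      have hcast : (len : Int) + 1 = ((len + 1 : Nat) : Int) := by push_cast; ring
      rw [hcast]
      have := ih (len + 1) (by omega) (by omega) (by omega)
      rw [show N + len + 1 = N + (len + 1) by omega]
      exact this

-- A's loop, run from step k of the orbit, detects the first repeat j (first seen at i) and returns j - i
lemma A_run_loop (grid : List String) (s0 : Int × Int × String) (j i : Nat)
    (horb : ∀ k, k ≤ j → orbT grid s0 k ≠ none)
    (hdist : ∀ a b, a < b → b < j → stO grid s0 a ≠ stO grid s0 b)
    (hij : i < j) (hrep : stO grid s0 i = stO grid s0 j)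
    (hfirst : ∀ a, a < i → stO grid s0 a ≠ stO grid s0 i) :
    ∀ fuel k, k ≤ j → j - k < fuel →
      dfsLoop grid fuel (stO grid s0 k).1 (stO grid s0 k).2.1 (stO grid s0 k).2.2
        ((List.range k).map (stO grid s0)) ((List.range k).map (stO grid s0)) = ((j - i : Nat) : Int) := by
  intro fuel
  induction fuel with
  | zero => intro k _ h; omega
  | succ fuel ih =>
    intro k hk hfuel
    by_cases hkj : k = j
    · subst hkj
      -- the first repeated state: return len(path[i:]) = j - i
      have hstep : stepState grid (stO grid s0 i) = some (stO grid s0 (i + 1)) :=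
        orbT_step grid s0 i (horb (i + 1) (by omega))
      have hbnd : pvInBounds (stO grid s0 i).1 (stO grid s0 i).2.1 grid = true :=
        (stepState_some_elim grid _ _ hstep).1
      have hbnd' : pvInBounds (stO grid s0 k).1 (stO grid s0 k).2.1 grid = true := by
        rw [← hrep]; exact hbnd
      have hmem : stO grid s0 k ∈ (List.range k).map (stO grid s0) :=
        List.mem_map.mpr ⟨i, List.mem_range.mpr hij, hrep⟩
      have hcont : PySem.Set.contains ((List.range k).map (stO grid s0)) ((stO grid s0 k).1, (stO grid s0 k).2.1, (stO grid s0 k).2.2) = true := by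
        simp only [Prod.mk.eta, PySem.Set.contains]
        simpa using hmem
      have hsplit : (List.range k).map (stO grid s0) =
          (List.range i).map (stO grid s0) ++ stO grid s0 k :: (List.range (k - i - 1)).map (fun t => stO grid s0 (i + 1 + t)) := by
        have h0 : k = i + (k - i) := by omega
        conv_lhs => rw [h0]
        rw [List.range_add, List.map_append]
        congr 1
        have h1 : k - i = (k - i - 1) + 1 := by omega
        rw [h1, List.range_succ_eq_map]
        simp only [List.map_cons, List.map_map, Function.comp_def, Nat.add_zero]
        rw [← hrep]
        congr 1
        apply List.map_congr_left
        intro a _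
        congr 1
        omega
      have hidx : PySem.List.index? ((List.range k).map (stO grid s0)) (stO grid s0 k) = some i := by
        rw [PySem.List.index?_eq_some_iff]
        refine ⟨(List.range i).map (stO grid s0), (List.range (k - i - 1)).map (fun t => stO grid s0 (i + 1 + t)), hsplit, by simp, ?_⟩
        intro hmem'
        obtain ⟨a, ha, hae⟩ := List.mem_map.mp hmem'
        rw [List.mem_range] at ha
        exact hfirst a ha (hae.trans hrep.symm)
      simp only [dfsLoop, if_pos hbnd', hcont, if_true, Prod.mk.eta, hidx,
        PySem.List.slice_from_natCast, List.length_drop, List.length_map, List.length_range]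
    · -- a fresh state: both record it and step
      have hkj' : k < j := by omega
      have hstep : stepState grid (stO grid s0 k) = some (stO grid s0 (k + 1)) :=
        orbT_step grid s0 k (horb (k + 1) (by omega))
      obtain ⟨hb, dx, dy, hd, hnext⟩ := stepState_some_elim grid _ _ hstep
      have hcont : PySem.Set.contains ((List.range k).map (stO grid s0)) ((stO grid s0 k).1, (stO grid s0 k).2.1, (stO grid s0 k).2.2) = false := by
        simp only [Prod.mk.eta, PySem.Set.contains]
        simp only [List.mem_map, List.mem_range, List.elem_eq_mem, decide_eq_false_iff_not, not_exists, not_and]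
        intro a ha hae
        exact hdist a k ha hkj' hae
      simp only [dfsLoop, if_pos hb, hcont, Bool.false_eq_true, if_false, Prod.mk.eta, hd]
      have hcont' : PySem.Set.contains ((List.range k).map (stO grid s0)) (stO grid s0 k) = false := by
        rw [show stO grid s0 k = ((stO grid s0 k).1, (stO grid s0 k).2.1, (stO grid s0 k).2.2) from rfl]
        exact hcont
      have hadd : PySem.Set.add ((List.range k).map (stO grid s0)) (stO grid s0 k) = (List.range k).map (stO grid s0) ++ [stO grid s0 k] := by
        simp only [PySem.Set.add, hcont']
        simp
      have hrange : (List.range k).map (stO grid s0) ++ [stO grid s0 k] = (List.range (k + 1)).map (stO grid s0) := by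
        rw [List.range_succ, List.map_append]; rfl
      rw [hadd, hrange]
      have h1 : (stO grid s0 k).1 + dx = (stO grid s0 (k + 1)).1 := by rw [hnext]
      have h2 : (stO grid s0 k).2.1 + dy = (stO grid s0 (k + 1)).2.1 := by rw [hnext]
      have h3 : getNextDirection (stO grid s0 k).1 (stO grid s0 k).2.1 (stO grid s0 k).2.2 grid = (stO grid s0 (k + 1)).2.2 := by rw [hnext]
      rw [h1, h2, h3]
      exact ih (k + 1) (by omega) (by omega)

-- A's loop, run on an orbit that escapes at step m, returns 0
lemma A_run_escape (grid : List String) (s0 : Int × Int × String) (m : Nat)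
    (hm : orbT grid s0 m ≠ none) (hm1 : orbT grid s0 (m + 1) = none)
    (hdist : ∀ a b, a < b → b ≤ m → stO grid s0 a ≠ stO grid s0 b) :
    ∀ fuel k, k ≤ m → m - k < fuel →
      dfsLoop grid fuel (stO grid s0 k).1 (stO grid s0 k).2.1 (stO grid s0 k).2.2
        ((List.range k).map (stO grid s0)) ((List.range k).map (stO grid s0)) = 0 := by
  intro fuel
  induction fuel with
  | zero => intro k _ h; omega
  | succ fuel ih =>
    intro k hk hfuel
    by_cases hkm : k = m
    · subst hkm
      -- the beam leaves the grid here (or, outside Pre_dfs, the deltas lookup fails): A returns 0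
      have hsn : stepState grid (stO grid s0 k) = none := by
        have h1 : orbT grid s0 (k + 1) = (orbT grid s0 k).bind (stepState grid) := rfl
        rw [hm1, orbT_eq_some grid s0 k hm] at h1
        simpa using h1.symm
      rcases stepState_none_elim grid _ hsn with hnb | ⟨hb, hd⟩
      · simp only [dfsLoop, Prod.mk.eta, if_neg hnb]
      · have hcont : PySem.Set.contains ((List.range k).map (stO grid s0)) ((stO grid s0 k).1, (stO grid s0 k).2.1, (stO grid s0 k).2.2) = false := by
          simp only [Prod.mk.eta, PySem.Set.contains]
          simp only [List.mem_map, List.mem_range, List.elem_eq_mem, decide_eq_false_iff_not, not_exists, not_and]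
          intro a ha hae
          exact hdist a k ha (le_refl k) hae
        simp only [dfsLoop, if_pos hb, hcont, Bool.false_eq_true, if_false, Prod.mk.eta, hd]
    · have hkm' : k < m := by omega
      have hstep : stepState grid (stO grid s0 k) = some (stO grid s0 (k + 1)) := by
        refine orbT_step grid s0 k ?_
        intro hn
        exact hm (orbT_mono_none grid s0 (by omega) hn)
      obtain ⟨hb, dx, dy, hd, hnext⟩ := stepState_some_elim grid _ _ hstep
      have hcont : PySem.Set.contains ((List.range k).map (stO grid s0)) ((stO grid s0 k).1, (stO grid s0 k).2.1, (stO grid s0 k).2.2) = false := by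
        simp only [Prod.mk.eta, PySem.Set.contains]
        simp only [List.mem_map, List.mem_range, List.elem_eq_mem, decide_eq_false_iff_not, not_exists, not_and]
        intro a ha hae
        exact hdist a k ha (by omega) hae
      simp only [dfsLoop, if_pos hb, hcont, Bool.false_eq_true, if_false, Prod.mk.eta, hd]
      have hcont' : PySem.Set.contains ((List.range k).map (stO grid s0)) (stO grid s0 k) = false := by
        rw [show stO grid s0 k = ((stO grid s0 k).1, (stO grid s0 k).2.1, (stO grid s0 k).2.2) from rfl]
        exact hcont
      have hadd : PySem.Set.add ((List.range k).map (stO grid s0)) (stO grid s0 k) = (List.range k).map (stO grid s0) ++ [stO grid s0 k] := by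
        simp only [PySem.Set.add, hcont']
        simp
      have hrange : (List.range k).map (stO grid s0) ++ [stO grid s0 k] = (List.range (k + 1)).map (stO grid s0) := by
        rw [List.range_succ, List.map_append]; rfl
      rw [hadd, hrange]
      have h1 : (stO grid s0 k).1 + dx = (stO grid s0 (k + 1)).1 := by rw [hnext]
      have h2 : (stO grid s0 k).2.1 + dy = (stO grid s0 (k + 1)).2.1 := by rw [hnext]
      have h3 : getNextDirection (stO grid s0 k).1 (stO grid s0 k).2.1 (stO grid s0 k).2.2 grid = (stO grid s0 (k + 1)).2.2 := by rw [hnext]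
      rw [h1, h2, h3]
      exact ih (k + 1) (by omega) (by omega)

-- ===== VERDICT (by name: the statement is the Claim_ definition above) =====
-- the states from step 1 on are step outputs: on a total orbit they are in-bounds with a legal direction
lemma stO_succ_mem (grid : List String) (s0 : Int × Int × String)
    (htot : ∀ k, orbT grid s0 k ≠ none) (t : Nat) : stO grid s0 (t + 1) ∈ allStates grid := by
  have hst : stepState grid (stO grid s0 t) = some (stO grid s0 (t + 1)) := orbT_step grid s0 t (htot _)
  obtain ⟨_, dx, dy, hd, hnext⟩ := stepState_some_elim grid _ _ hst
  have hst2 : stepState grid (stO grid s0 (t + 1)) = some (stO grid s0 (t + 2)) := orbT_step grid s0 (t + 1) (htot _)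
  obtain ⟨hb2, _⟩ := stepState_some_elim grid _ _ hst2
  apply mem_allStates grid _ hb2
  rw [hnext]
  exact dirDelta_some_valid _ _ hd

theorem dfs_spec : Claim_equal_dfs := by
  unfold Claim_equal_dfs
  intro x y direction visited grid _ hpre
  unfold Spec_dfs dfs dfs_alt
  dsimp only
  rw [phase1B_eq grid _ (x, y, direction)]
  set n : Nat := 4 * grid.length * (PySem.Str.len (grid.headD "")).toNat with hn
  by_cases hesc : ∃ m, orbT grid (x, y, direction) m = none
  · -- ESCAPE: the beam leaves the grid (or, outside Pre_dfs, a lookup fails): both return 0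
    have hM0 : 0 < Nat.find hesc := by
      rcases Nat.eq_zero_or_pos (Nat.find hesc) with h0 | h0
      · have := Nat.find_spec hesc
        rw [h0] at this
        simp [orbT] at this
      · exact h0
    have hm : orbT grid (x, y, direction) (Nat.find hesc - 1) ≠ none := Nat.find_min hesc (by omega)
    have hm1 : orbT grid (x, y, direction) ((Nat.find hesc - 1) + 1) = none := by
      rw [show (Nat.find hesc - 1) + 1 = Nat.find hesc by omega]
      exact Nat.find_spec hesc
    have hdist : ∀ a b, a < b → b ≤ Nat.find hesc - 1 → stO grid (x, y, direction) a ≠ stO grid (x, y, direction) b := by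
      intro a b hab hbm heq
      have ha : orbT grid (x, y, direction) a ≠ none := fun hna => hm (orbT_mono_none _ _ (by omega) hna)
      have hb : orbT grid (x, y, direction) b ≠ none := fun hnb => hm (orbT_mono_none _ _ hbm hnb)
      have hrep : orbT grid (x, y, direction) a = orbT grid (x, y, direction) b := by
        rw [orbT_eq_some _ _ _ ha, orbT_eq_some _ _ _ hb, heq]
      exact orbT_total_of_repeat grid (x, y, direction) hab hrep hb ((Nat.find hesc - 1) + 1) hm1
    have hmn : Nat.find hesc - 1 ≤ n := by
      apply pigeonhole grid (Nat.find hesc - 1) (stO grid (x, y, direction))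
      · intro a b hab hbm
        exact hdist a b hab (by omega)
      · intro k hkm
        have hsk : stepState grid (stO grid (x, y, direction) k) = some (stO grid (x, y, direction) (k + 1)) :=
          orbT_step _ _ k (fun hnk => hm (orbT_mono_none _ _ (by omega) hnk))
        obtain ⟨hbk, _, _, _, _⟩ := stepState_some_elim grid _ _ hsk
        apply mem_allStates grid _ hbk
        rcases Nat.eq_zero_or_pos k with h0 | h0
        · subst h0
          rcases hpre with hnb | ⟨hdir, _⟩
          · exact absurd (of_decide_eq_true hbk) hnb
          · exact hdir
        · obtain ⟨t, rfl⟩ : ∃ t, k = t + 1 := ⟨k - 1, by omega⟩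
          have hst : stepState grid (stO grid (x, y, direction) t) = some (stO grid (x, y, direction) (t + 1)) :=
            orbT_step _ _ t (fun hnt => hm (orbT_mono_none _ _ (by omega) hnt))
          obtain ⟨_, dx, dy, hd, hnext⟩ := stepState_some_elim grid _ _ hst
          rw [hnext]
          exact dirDelta_some_valid _ _ hd
    have hA : dfsLoop grid (n + 2) x y direction [] PySem.Set.empty = 0 :=
      A_run_escape grid (x, y, direction) (Nat.find hesc - 1) hm hm1 hdist (n + 2) 0 (by omega) (by omega)
    have hB : orbT grid (x, y, direction) (n + 1) = none :=
      orbT_mono_none grid (x, y, direction) (show Nat.find hesc ≤ n + 1 by omega) (Nat.find_spec hesc)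
    rw [hA, hB]
  · -- LOOP: the orbit is total; A detects the first repeat, B measures the loop from step n+1
    push_neg at hesc
    have htot : ∀ m, orbT grid (x, y, direction) m ≠ none := hesc
    have hPex : ∃ k, ∃ a ∈ List.range k, stO grid (x, y, direction) a = stO grid (x, y, direction) k := by
      by_contra hno
      push_neg at hno
      have hcontra : n + 2 ≤ n := by
        apply pigeonhole grid (n + 2) (fun t => stO grid (x, y, direction) (t + 1))
        · intro a b hab hbm heq
          exact hno (b + 1) (a + 1) (List.mem_range.mpr (by omega)) heq
        · intro k _
          exact stO_succ_mem grid (x, y, direction) htot k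
      omega
    obtain ⟨i0, hi0r, hi0⟩ := Nat.find_spec hPex
    have hdist : ∀ a b, a < b → b < Nat.find hPex → stO grid (x, y, direction) a ≠ stO grid (x, y, direction) b := by
      intro a b hab hbj heq
      exact Nat.find_min hPex hbj ⟨a, List.mem_range.mpr hab, heq⟩
    have hQ : ∃ a, a < Nat.find hPex ∧ stO grid (x, y, direction) a = stO grid (x, y, direction) (Nat.find hPex) :=
      ⟨i0, List.mem_range.mp hi0r, hi0⟩
    obtain ⟨hij, hrep⟩ := Nat.find_spec hQ
    have hfirst : ∀ a, a < Nat.find hQ → stO grid (x, y, direction) a ≠ stO grid (x, y, direction) (Nat.find hQ) := by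
      intro a hai heq
      exact Nat.find_min hQ hai ⟨by omega, heq.trans hrep⟩
    have hjn : Nat.find hPex ≤ n + 1 := by
      by_contra hgt
      push_neg at hgt
      have hcontra : n + 1 ≤ n := by
        apply pigeonhole grid (n + 1) (fun t => stO grid (x, y, direction) (t + 1))
        · intro a b hab hbm heq
          exact hdist (a + 1) (b + 1) (by omega) (by omega) heq
        · intro k _
          exact stO_succ_mem grid (x, y, direction) htot k
      omega
    have hA : dfsLoop grid (n + 2) x y direction [] PySem.Set.empty = ((Nat.find hPex - Nat.find hQ : Nat) : Int) :=
      A_run_loop grid (x, y, direction) (Nat.find hPex) (Nat.find hQ) (fun k _ => htot k) hdist hij hrep hfirst (n + 2) 0 (by omega) (by omega)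
    have hcur : orbT grid (x, y, direction) (n + 1) = some (stO grid (x, y, direction) (n + 1)) :=
      orbT_eq_some _ _ _ (htot _)
    rw [hA, hcur]
    dsimp only
    have hstepcur : stepState grid (stO grid (x, y, direction) (n + 1)) = some (stO grid (x, y, direction) (n + 2)) :=
      orbT_step _ _ _ (htot _)
    rw [hstepcur]
    dsimp only
    have hrepO : orbT grid (x, y, direction) (Nat.find hQ) = orbT grid (x, y, direction) (Nat.find hPex) := by
      rw [orbT_eq_some _ _ _ (htot _), orbT_eq_some _ _ _ (htot _), hrep]
    have hper : stO grid (x, y, direction) ((n + 1) + (Nat.find hPex - Nat.find hQ)) = stO grid (x, y, direction) (n + 1) := by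
      have hs := orbT_shift grid (x, y, direction) hij hrepO (n + 1) (by omega)
      exact congrArg (fun o => Option.getD o ((0 : Int), (0 : Int), "")) hs
    have hmin : ∀ t, 0 < t → t < Nat.find hPex - Nat.find hQ →
        stO grid (x, y, direction) ((n + 1) + t) ≠ stO grid (x, y, direction) (n + 1) := by
      intro t ht htp heq
      have hmodN := orbT_mod grid (x, y, direction) hij hrepO (n + 1) (by omega)
      have hmodNt := orbT_mod grid (x, y, direction) hij hrepO ((n + 1) + t) (by omega)
      have e1 : stO grid (x, y, direction) (n + 1) = stO grid (x, y, direction) (Nat.find hQ + ((n + 1) - Nat.find hQ) % (Nat.find hPex - Nat.find hQ)) := by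
        exact congrArg (fun o => Option.getD o ((0 : Int), (0 : Int), "")) hmodN
      have e2 : stO grid (x, y, direction) ((n + 1) + t) = stO grid (x, y, direction) (Nat.find hQ + ((n + 1) + t - Nat.find hQ) % (Nat.find hPex - Nat.find hQ)) := by
        exact congrArg (fun o => Option.getD o ((0 : Int), (0 : Int), "")) hmodNt
      have hT : (n + 1) + t - Nat.find hQ = ((n + 1) - Nat.find hQ) + t := by omega
      rw [hT] at e2
      have hr1 : ((n + 1) - Nat.find hQ) % (Nat.find hPex - Nat.find hQ) < Nat.find hPex - Nat.find hQ := Nat.mod_lt _ (by omega)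
      have hr2 : (((n + 1) - Nat.find hQ) + t) % (Nat.find hPex - Nat.find hQ) < Nat.find hPex - Nat.find hQ := Nat.mod_lt _ (by omega)
      have heq' : stO grid (x, y, direction) (Nat.find hQ + (((n + 1) - Nat.find hQ) + t) % (Nat.find hPex - Nat.find hQ)) = stO grid (x, y, direction) (Nat.find hQ + ((n + 1) - Nat.find hQ) % (Nat.find hPex - Nat.find hQ)) := by
        rw [← e1, ← e2, heq]
      rcases Nat.lt_trichotomy (((n + 1) - Nat.find hQ) % (Nat.find hPex - Nat.find hQ)) ((((n + 1) - Nat.find hQ) + t) % (Nat.find hPex - Nat.find hQ)) with h | h | h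
      · exact hdist _ _ (by omega) (by omega) heq'.symm
      · have hmeq : Nat.ModEq (Nat.find hPex - Nat.find hQ) ((n + 1) - Nat.find hQ) (((n + 1) - Nat.find hQ) + t) := h
        have hdvd := (Nat.modEq_iff_dvd' (Nat.le_add_right _ _)).mp hmeq
        rw [Nat.add_sub_cancel_left] at hdvd
        have := Nat.le_of_dvd ht hdvd
        omega
      · exact hdist _ _ (by omega) (by omega) heq'
    have hM := measure_run grid (x, y, direction) (n + 1) (Nat.find hPex - Nat.find hQ) htot hper hmin 1 (n + 1) (by omega) (by omega) (by omega)
    rw [Nat.cast_one] at hM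
    rw [show n + 2 = (n + 1) + 1 by omega, hM]
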